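-- pv_equiv track=rewrite | github.com/VasluianI0n/LFPC | src/Chomsky/prod.py | replace_nullables
-- ===== SOURCE A (Python) =====
-- def replace_nullables(productions, nullables):
--     count = 0
--     for prod in productions:
--         for nullable in nullables:
--             if nullable == prod:
--                 index = productions.index(prod)
--                 productions[index] = 'Q'
--                 count = count + 1
--     return (productions, count)
-- ===== SOURCE B (Python) =====
-- def replace_nullables(productions, nullables):
--     # Single in-place pass with a set, instead of A's nested scan + repeated .index.
--     ns = set(nullables)
--     count = 0
--     for i, prod in enumerate(productions):
--         if prod in ns:
--             productions[i] = 'Q'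
--             count += 1
--     return (productions, count)
-- ===== Notes on version B (the rewrite author's own statement) =====
-- stated objective: faster
-- what changed: Nested loop over nullables with repeated productions.index scans replaced by one enumerate pass over productions testing membership in a set built once.
-- outside the precondition, e.g. on replace_nullables(['Q'], ['Q', 'Q']): A returns (['Q'], 2), B returns (['Q'], 1); on replace_nullables(['a'], ['a', 'a']): A raises ValueError, B returns (['Q'], 1)
import Mathlib
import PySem

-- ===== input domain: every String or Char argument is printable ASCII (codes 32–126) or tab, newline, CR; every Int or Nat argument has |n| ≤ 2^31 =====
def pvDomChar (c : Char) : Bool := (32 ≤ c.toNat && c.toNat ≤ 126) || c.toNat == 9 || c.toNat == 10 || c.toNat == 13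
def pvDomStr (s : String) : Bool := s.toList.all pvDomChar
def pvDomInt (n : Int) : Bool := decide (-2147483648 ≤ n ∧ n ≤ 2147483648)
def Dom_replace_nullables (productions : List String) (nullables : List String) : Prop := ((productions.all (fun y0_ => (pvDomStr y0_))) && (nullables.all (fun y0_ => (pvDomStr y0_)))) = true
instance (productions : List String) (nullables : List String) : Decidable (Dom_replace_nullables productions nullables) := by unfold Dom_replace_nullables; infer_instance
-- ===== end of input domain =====

-- B replaces A's nested scan (for each production, scan all nullables and re-scan the list
-- with .index) by one pass testing set membership; both Pythons mutate `productions` in place,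
-- the equivalence proved here is about the returned value.

-- ===== PORT A =====
-- inner loop: `for nullable in nullables: if nullable == prod: index = productions.index(prod); productions[index] = 'Q'; count += 1`
-- (`none` = ValueError from `.index` when prod is no longer in the list; excluded by Pre_)
def pvInnerA (prod : String) : List String → List String × Int → Option (List String × Int)
  | [], st => some st
  | nullable :: rest, (ps, c) =>
    if nullable == prod then
      match PySem.List.index? ps prod with
      | some i => pvInnerA prod rest (ps.set i "Q", c + 1)
      | none => none
    else pvInnerA prod rest (ps, c)

-- outer loop: `for prod in productions` iterates by position over the list being mutated;
-- its length never changes, so fuel = initial length, j = current position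
def pvOuterA (nullables : List String) : Nat → Nat → List String × Int → Option (List String × Int)
  | 0, _, st => some st
  | fuel + 1, j, st =>
    match st.1[j]? with
    | none => some st
    | some prod => (pvInnerA prod nullables st).bind (pvOuterA nullables fuel (j + 1))

def replace_nullables (productions : List String) (nullables : List String) : List String × Int :=
  (pvOuterA nullables productions.length 0 (productions, 0)).getD (productions, 0)

-- ===== PORT B =====
-- `for i, prod in enumerate(productions): if prod in ns: productions[i] = 'Q'; count += 1`
def pvAltGo (ns : PySem.Set String) : List String → List String × Int
  | [] => ([], 0)
  | p :: ps =>
    let r := pvAltGo ns ps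
    if PySem.Set.contains ns p then ("Q" :: r.1, r.2 + 1) else (p :: r.1, r.2)

def replace_nullables_alt (productions : List String) (nullables : List String) : List String × Int :=
  pvAltGo (PySem.Set.ofList nullables) productions

-- ===== PRECONDITION & SPEC =====
-- Pre_ excludes inputs where some nullable occurring among the productions is listed more than
-- once in nullables: there A re-runs the replacement once per duplicate, raising ValueError on
-- some inputs (`.index` no longer finds the production) and inflating the count on others — an
-- accident of the inner rescan, not a behaviour anyone would specify.
def Pre_replace_nullables (productions : List String) (nullables : List String) : Prop :=
  ∀ v ∈ productions, nullables.count v ≤ 1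
instance (productions : List String) (nullables : List String) : Decidable (Pre_replace_nullables productions nullables) := by unfold Pre_replace_nullables; infer_instance

def pvWitness_replace_nullables : List String × List String := (["A", "B", "A"], ["A", "C"])

def Spec_replace_nullables (productions : List String) (nullables : List String) (out : List String × Int) : Prop := out = replace_nullables_alt productions nullables
instance (productions : List String) (nullables : List String) (out : List String × Int) : Decidable (Spec_replace_nullables productions nullables out) := by unfold Spec_replace_nullables; infer_instance

-- ===== CLAIM (what is proved, stated in full; the proofs are below) =====
def Claim_equal_replace_nullables : Prop := ∀ (productions : List String) (nullables : List String), Dom_replace_nullables productions nullables → Pre_replace_nullables productions nullables → Spec_replace_nullables productions nullables (replace_nullables productions nullables)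

-- ===== LEMMAS AND PROOFS =====

-- the common value: every production that is a nullable becomes "Q", count = number of such positions
def pvMark (nl : List String) (s : String) : String := if s ∈ nl then "Q" else s

def pvM (nl : List String) (l : List String) : List String := l.map (pvMark nl)

theorem pvAltGo_eq (nl : List String) (ns : PySem.Set String)
    (hns : ∀ x, PySem.Set.contains ns x = decide (x ∈ nl)) (l : List String) :
    pvAltGo ns l = (pvM nl l, (l.countP (fun s => decide (s ∈ nl)) : Int)) := by
  induction l with
  | nil => simp [pvAltGo, pvM]
  | cons p ps ih =>
    simp only [pvAltGo, ih, hns, pvM, List.map_cons, List.countP_cons, pvMark]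
    by_cases h : p ∈ nl <;> simp [h]

theorem pvInnerA_not_mem (prod : String) (nl : List String) (h : prod ∉ nl)
    (st : List String × Int) : pvInnerA prod nl st = some st := by
  induction nl with
  | nil => rfl
  | cons n rest ih =>
    obtain ⟨ps, c⟩ := st
    have hne : (n == prod) = false := by
      simp only [List.mem_cons, not_or] at h
      simp [Ne.symm h.1]
    simp [pvInnerA, hne, ih (by simp only [List.mem_cons, not_or] at h; exact h.2)]

theorem pvInnerA_skip (prod : String) (l1 t : List String) (h : prod ∉ l1)
    (st : List String × Int) : pvInnerA prod (l1 ++ t) st = pvInnerA prod t st := by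
  induction l1 generalizing st with
  | nil => rfl
  | cons n rest ih =>
    obtain ⟨ps, c⟩ := st
    have hne : (n == prod) = false := by
      simp only [List.mem_cons, not_or] at h
      simp [Ne.symm h.1]
    simp only [List.cons_append, pvInnerA, hne, Bool.false_eq_true, if_false]
    exact ih (by simp only [List.mem_cons, not_or] at h; exact h.2) _

theorem prod_not_mem_pvM (nl pre : List String) (prod : String)
    (hmem : prod ∈ nl) (hQ : prod ≠ "Q") : prod ∉ pvM nl pre := by
  intro hc
  simp only [pvM, List.mem_map] at hc
  obtain ⟨x, _, hx⟩ := hc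
  by_cases h : x ∈ nl
  · simp [pvMark, h] at hx; exact hQ hx.symm
  · simp [pvMark, h] at hx; exact h (hx ▸ hmem)

theorem pvInnerA_mem (nl : List String) (prod : String) (hc1 : nl.count prod ≤ 1)
    (hmem : prod ∈ nl) (pre rest : List String) (c : Int) :
    pvInnerA prod nl (pvM nl pre ++ prod :: rest, c) =
      some (pvM nl pre ++ "Q" :: rest, c + 1) := by
  obtain ⟨l1, l2, rfl⟩ := List.append_of_mem hmem
  rw [List.count_append, List.count_cons_self] at hc1
  have h1 : prod ∉ l1 := by
    rw [← List.count_eq_zero]; omega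
  have h2 : prod ∉ l2 := by
    rw [← List.count_eq_zero]; omega
  rw [pvInnerA_skip prod l1 _ h1]
  set nl := l1 ++ prod :: l2 with hnl
  set cur := pvM nl pre ++ prod :: rest with hcur
  have hstep : ∃ i, PySem.List.index? cur prod = some i ∧
      cur.set i "Q" = pvM nl pre ++ "Q" :: rest := by
    by_cases hQ : prod = "Q"
    · -- already-"Q" case: .index finds the first "Q", setting it to "Q" changes nothing
      have hin : prod ∈ cur := by rw [hcur]; exact List.mem_append_right _ (List.mem_cons_self)
      obtain ⟨i, hi⟩ := Option.isSome_iff_exists.mp (Iff.mpr (PySem.List.index?_isSome_iff _ _) hin)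
      refine ⟨i, hi, ?_⟩
      obtain ⟨hlt, hv, -⟩ := PySem.List.getElem_of_index?_eq_some hi
      have : cur.set i "Q" = cur := by
        rw [hQ] at hv; conv_lhs => rw [← hv]
        exact List.set_getElem_self hlt
      rw [this, hcur, hQ]
    · refine ⟨(pvM nl pre).length, ?_, ?_⟩
      · rw [PySem.List.index?_eq_some_iff]
        exact ⟨_, rest, rfl, rfl, prod_not_mem_pvM _ _ _ hmem hQ⟩
      · rw [hcur, List.set_append_right _ _ (le_refl _)]
        simp
  obtain ⟨i, hi, hset⟩ := hstep
  simp only [pvInnerA, beq_self_eq_true, if_true, hi, hset]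
  exact pvInnerA_not_mem prod l2 h2 _

theorem pvOuterA_inv (nl : List String) (pre suf : List String)
    (hc1 : ∀ v ∈ suf, nl.count v ≤ 1) (c : Int) :
    pvOuterA nl suf.length pre.length (pvM nl pre ++ suf, c) =
      some (pvM nl (pre ++ suf), c + (suf.countP (fun s => decide (s ∈ nl)) : Int)) := by
  induction suf generalizing pre c with
  | nil => simp [pvOuterA, pvM]
  | cons p rest ih =>
    have hrest : ∀ v ∈ rest, nl.count v ≤ 1 := fun v hv => hc1 v (List.mem_cons_of_mem _ hv)
    have hget : (pvM nl pre ++ p :: rest)[pre.length]? = some p := by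
      rw [List.getElem?_append_right (by simp [pvM])]
      simp [pvM]
    by_cases hmem : p ∈ nl
    · simp only [List.length_cons, pvOuterA, hget, pvInnerA_mem nl p (hc1 p List.mem_cons_self) hmem pre rest c,
        Option.bind_some]
      have hM : pvM nl pre ++ "Q" :: rest = pvM nl (pre ++ [p]) ++ rest := by
        simp [pvM, pvMark, hmem]
      have hlen : pre.length + 1 = (pre ++ [p]).length := by simp
      rw [hM, hlen, ih _ hrest]
      simp only [List.countP_cons, hmem, decide_true, List.append_assoc, List.cons_append,
        List.nil_append]
      norm_num
      ring
    · simp only [List.length_cons, pvOuterA, hget,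
        pvInnerA_not_mem p nl hmem (pvM nl pre ++ p :: rest, c), Option.bind_some]
      have hM : pvM nl pre ++ p :: rest = pvM nl (pre ++ [p]) ++ rest := by
        simp [pvM, pvMark, hmem]
      have hlen : pre.length + 1 = (pre ++ [p]).length := by simp
      rw [hM, hlen, ih _ hrest]
      simp only [List.countP_cons, hmem, decide_false, List.append_assoc, List.cons_append,
        List.nil_append]
      norm_num

-- ===== VERDICT (by name: the statement is the Claim_ definition above) =====
theorem replace_nullables_spec : Claim_equal_replace_nullables := by
  intro productions nullables _ hpre
  unfold Spec_replace_nullables replace_nullables replace_nullables_alt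
  have hA := pvOuterA_inv nullables [] productions hpre 0
  simp only [pvM, List.map_nil, List.nil_append, List.length_nil] at hA
  rw [hA]
  rw [pvAltGo_eq nullables (PySem.Set.ofList nullables)
    (fun x => by
      by_cases hx : x ∈ nullables
      · rw [Iff.mpr (PySem.Set.contains_iff _ _) (Iff.mpr (PySem.Set.mem_ofList _ _) hx),
          decide_eq_true hx]
      · have hne : PySem.Set.contains (PySem.Set.ofList nullables) x ≠ true := fun h =>
          hx (Iff.mp (PySem.Set.mem_ofList _ _) (Iff.mp (PySem.Set.contains_iff _ _) h))
        simp only [hx, decide_false, Bool.not_eq_true] at hne ⊢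
        exact hne)
    productions]
  simp [pvM]
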